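-- pv_equiv track=rewrite | github.com/WisTiCeJEnT/temporaryRepoForW3Homework | dining_table.py | dining_table
-- ===== SOURCE A (Python) =====
-- def dining_table(n):
--     if(n==0):
--         return 1
--     x = 1
--     while(n//x >= x+1):
--         n = n//x
--         x += 1
--     return x+1
-- ===== SOURCE B (Python) =====
-- def dining_table(n):
--     # Build the list of factorials [2!, 3!, ...] while the last one is <= n;
--     # the answer is len(facts) + 1, since A's chain of floor divisions
--     # n//1//2//...//x >= x+1 holds exactly when (x+1)! <= n.
--     if n == 0:
--         return 1
--     facts = [2]
--     while facts[-1] <= n: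
--         facts.append(facts[-1] * (len(facts) + 2))
--     return len(facts) + 1
-- ===== Notes on version B (the rewrite author's own statement) =====
-- stated objective: alternative
-- what changed: B never mutates n and keeps no counter: it builds the list of successive factorials while the last one is at most n and returns the list's length plus one, using the identity that A's chain of floor divisions staying large is exactly a factorial bound on n.
import Mathlib
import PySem

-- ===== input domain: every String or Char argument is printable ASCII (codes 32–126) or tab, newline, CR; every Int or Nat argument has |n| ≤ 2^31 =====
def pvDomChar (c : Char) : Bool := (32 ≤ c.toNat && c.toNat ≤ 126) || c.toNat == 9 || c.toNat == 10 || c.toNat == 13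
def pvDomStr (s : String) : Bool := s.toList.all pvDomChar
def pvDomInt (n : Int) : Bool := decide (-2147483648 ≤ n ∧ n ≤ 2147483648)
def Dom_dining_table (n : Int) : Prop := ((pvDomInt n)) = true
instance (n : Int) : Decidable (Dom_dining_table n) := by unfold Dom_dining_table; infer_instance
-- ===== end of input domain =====

-- B builds a list of factorials and returns its length, instead of mutating n; proved equal to A everywhere.

-- ===== PORT A =====
-- A's while loop; fuel bounds the iteration count only (≤ 13 iterations for |n| ≤ 2^31,
-- since the loop requires n//x! ≥ x+1 and 13! > 2^31; 100 is ample).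
def dtLoopA (fuel : Nat) (n x : Int) : Int :=
  match fuel with
  | 0 => x + 1
  | fuel + 1 =>
    if PySem.Int.floordiv n x ≥ x + 1 then
      dtLoopA fuel (PySem.Int.floordiv n x) (x + 1)
    else x + 1

def dining_table (n : Int) : Int :=
  if n = 0 then 1 else dtLoopA 100 n 1

-- ===== PORT B =====
-- B's while loop: grow the factorial list while facts[-1] <= n (same fuel bound remark).
def dtGrow (fuel : Nat) (n : Int) (facts : List Int) : List Int :=
  match fuel with
  | 0 => facts
  | fuel + 1 =>
    if (PySem.List.pyGet? facts (-1)).getD 0 ≤ n then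
      dtGrow fuel n (facts ++ [(PySem.List.pyGet? facts (-1)).getD 0 * ((facts.length : Int) + 2)])
    else facts

def dining_table_alt (n : Int) : Int :=
  if n = 0 then 1 else ((dtGrow 100 n [2]).length : Int) + 1

-- ===== PRECONDITION & SPEC =====
def Spec_dining_table (n : Int) (out : Int) : Prop := out = dining_table_alt n
instance (n : Int) (out : Int) : Decidable (Spec_dining_table n out) := by unfold Spec_dining_table; infer_instance

-- ===== CLAIM (what is proved, stated in full; the proofs are below) =====
def Claim_equal_dining_table : Prop := ∀ (n : Int), Dom_dining_table n → Spec_dining_table n (dining_table n)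

-- ===== LEMMAS AND PROOFS =====

theorem pv_floordiv_eq_fdiv (a b : Int) : PySem.Int.floordiv a b = Int.fdiv a b := by
  rfl

-- Core invariant: at A's loop head the mutated variable equals n.fdiv k with
-- k = (x-1)!, while B's list ends in (x+1)*x*k = (x+1)! and has length x.
theorem dtLoop_eq (fuel : Nat) : ∀ (n x k : Int) (facts : List Int), 1 ≤ x → 0 ≤ n → 0 < k →
    PySem.List.pyGet? facts (-1) = some ((x + 1) * x * k) → (facts.length : Int) = x →
    dtLoopA fuel (Int.fdiv n k) x = ((dtGrow fuel n facts).length : Int) + 1 := by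
  induction fuel with
  | zero => intro n x k facts _ _ _ _ hlen; simp [dtLoopA, dtGrow, hlen]
  | succ fuel ih =>
    intro n x k facts hx hn hk hlast hlen
    have hx0 : (0:Int) < x := by omega
    have hcond : (PySem.Int.floordiv (Int.fdiv n k) x ≥ x + 1) ↔ ((x + 1) * x * k ≤ n) := by
      rw [pv_floordiv_eq_fdiv, Int.fdiv_fdiv_eq_fdiv_mul n hk.le hx0.le,
        Int.fdiv_eq_ediv_of_nonneg n (by positivity),
        ge_iff_le, Int.le_ediv_iff_mul_le (by positivity)]
      constructor <;> intro h <;> nlinarith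
    simp only [dtLoopA, dtGrow, hlast, Option.getD_some]
    by_cases h : (x + 1) * x * k ≤ n
    · rw [if_pos (hcond.mpr h), if_pos h]
      have hlast' : PySem.List.pyGet?
          (facts ++ [(x + 1) * x * k * ((facts.length : Int) + 2)]) (-1)
          = some ((x + 1 + 1) * (x + 1) * (k * x)) := by
        rw [PySem.List.pyGet?_neg_one_append_singleton, hlen]
        ring_nf
      have := ih n (x + 1) (k * x)
        (facts ++ [(x + 1) * x * k * ((facts.length : Int) + 2)])
        (by omega) hn (by positivity) hlast' (by simp [hlen])
      rw [pv_floordiv_eq_fdiv, Int.fdiv_fdiv_eq_fdiv_mul n hk.le hx0.le]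
      exact this
    · rw [if_neg (fun hc => h (hcond.mp hc)), if_neg h, hlen]

-- One-step stop lemmas for the two loops (used by the verdict proof).
theorem dtLoopA_stop (fuel : Nat) (n x : Int)
    (h : ¬ PySem.Int.floordiv n x ≥ x + 1) : dtLoopA (fuel + 1) n x = x + 1 := by
  simp [dtLoopA, h]

theorem dtGrow_stop (fuel : Nat) (n : Int) (facts : List Int)
    (h : ¬ (PySem.List.pyGet? facts (-1)).getD 0 ≤ n) : dtGrow (fuel + 1) n facts = facts := by
  simp [dtGrow, h]

-- ===== VERDICT (by name: the statement is the Claim_ definition above) =====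
theorem dining_table_spec : Claim_equal_dining_table := by
  intro n _
  unfold Spec_dining_table dining_table dining_table_alt
  by_cases h0 : n = 0
  · simp [h0]
  · rw [if_neg h0, if_neg h0]
    by_cases h2 : 2 ≤ n
    · have := dtLoop_eq 100 n 1 1 [2] le_rfl (by omega) (by omega)
        (by simp [PySem.List.pyGet?_neg_one]) (by simp)
      simpa [Int.fdiv_one] using this
    · -- n < 2, n ≠ 0: both loops exit on the first test and return 2
      have hA : ¬ (PySem.Int.floordiv n 1 ≥ (1:Int) + 1) := by
        rw [pv_floordiv_eq_fdiv, Int.fdiv_one]; omega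
      rw [show (100:Nat) = 99+1 from rfl, dtLoopA_stop 99 n 1 hA,
        dtGrow_stop 99 n [2] (by simp [PySem.List.pyGet?_neg_one]; omega)]
      rfl
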